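-- pv_equiv track=rewrite | github.com/Kabalikabalo/BourneToTranslate | html_generation/CulturePageGenerator.py | parse_culture_content
-- ===== SOURCE A (Python) =====
-- def parse_culture_content(content_txt):
--     lines = [l.strip() for l in content_txt.split('\n') if l.strip()]
--     i = 0
--     blocks = []
--     first_image = None
--
--     while i < len(lines):
--         if lines[i].startswith('(') and lines[i].endswith(')'):
--             img_path = lines[i][1:-1].strip()
--             if not first_image:
--                 first_image = img_path
--             blocks.append(('img', img_path))
--             i += 1
--         else:
--             # Get English paragraph
--             english_para = lines[i]
--             i += 1
--
--             # Get target language paragraph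
--             target_para = ''
--             if i < len(lines) and not lines[i].startswith('('):
--                 target_para = lines[i]
--                 i += 1
--
--             blocks.append(('text', english_para, target_para))
--
--     return blocks, first_image
-- ===== SOURCE B (Python) =====
-- def parse_culture_content(content_txt):
--     blocks = []
--     first_image = None
--     pending = None  # an English paragraph awaiting its translation line
--
--     for raw in content_txt.split('\n'):
--         line = raw.strip()
--         if not line:
--             continue
--         if pending is not None:
--             if line.startswith('('):
--                 blocks.append(('text', pending, ''))
--             else:
--                 blocks.append(('text', pending, line))
--                 pending = None
--                 continue
--             pending = None
--         if line.startswith('(') and line.endswith(')'):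
--             img_path = line[1:-1].strip()
--             if not first_image:
--                 first_image = img_path
--             blocks.append(('img', img_path))
--         else:
--             pending = line
--
--     if pending is not None:
--         blocks.append(('text', pending, ''))
--
--     return blocks, first_image
-- ===== Notes on version B (the rewrite author's own statement) =====
-- stated objective: simpler
-- what changed: Replaces A's pre-built filtered line list with index-based while loop and one-line lookahead by a single for-pass over the raw split lines that strips/skips inline and carries a pending-English-paragraph state variable, flushed after the loop.
import Mathlib
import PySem

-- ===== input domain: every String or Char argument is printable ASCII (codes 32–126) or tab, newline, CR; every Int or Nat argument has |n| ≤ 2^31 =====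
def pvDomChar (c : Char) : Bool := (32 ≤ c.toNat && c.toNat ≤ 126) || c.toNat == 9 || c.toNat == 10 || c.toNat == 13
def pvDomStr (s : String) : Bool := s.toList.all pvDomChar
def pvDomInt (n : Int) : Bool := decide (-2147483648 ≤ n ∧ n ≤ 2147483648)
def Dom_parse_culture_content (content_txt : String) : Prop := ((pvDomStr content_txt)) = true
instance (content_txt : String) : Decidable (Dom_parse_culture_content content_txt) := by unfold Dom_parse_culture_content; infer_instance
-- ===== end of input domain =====

-- B replaces A's index-and-lookahead while loop by a single pass over the raw
-- lines with a pending-paragraph state machine (objective: simpler decomposition).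

-- ===== PORT A =====
-- while loop over the pre-stripped, pre-filtered line list, with lookahead lines[i+1]
def pvLoopA : List String → List (List String) → Option String → List (List String) × Option String
  | [], blocks, fi => (blocks, fi)
  | [l], blocks, fi =>
    if PySem.Str.startswith l "(" && PySem.Str.endswith l ")" then
      let img := PySem.Str.strip (PySem.Str.slice l (some 1) (some (-1)))
      (blocks ++ [["img", img]], if fi.getD "" = "" then some img else fi)
    else
      (blocks ++ [["text", l, ""]], fi)
  | l :: r :: rest, blocks, fi =>
    if PySem.Str.startswith l "(" && PySem.Str.endswith l ")" then
      let img := PySem.Str.strip (PySem.Str.slice l (some 1) (some (-1)))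
      pvLoopA (r :: rest) (blocks ++ [["img", img]]) (if fi.getD "" = "" then some img else fi)
    else if PySem.Str.startswith r "(" then
      pvLoopA (r :: rest) (blocks ++ [["text", l, ""]]) fi
    else
      pvLoopA rest (blocks ++ [["text", l, r]]) fi

def parse_culture_content (content_txt : String) : List (List String) × Option String :=
  let lines := (((PySem.Str.split? content_txt "\n").getD []).map PySem.Str.strip).filter (fun l => !(l = ""))
  pvLoopA lines [] none

-- ===== PORT B =====
-- handle a freshly seen (non-empty, unpended) line
def pvFresh (blocks : List (List String)) (fi : Option String) (line : String) :
    List (List String) × Option String × Option String :=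
  if PySem.Str.startswith line "(" && PySem.Str.endswith line ")" then
    let img := PySem.Str.strip (PySem.Str.slice line (some 1) (some (-1)))
    (blocks ++ [["img", img]], if fi.getD "" = "" then some img else fi, none)
  else
    (blocks, fi, some line)

-- one iteration of B's for loop over the raw split lines
def pvStepB (st : List (List String) × Option String × Option String) (raw : String) :
    List (List String) × Option String × Option String :=
  let line := PySem.Str.strip raw
  if line = "" then st
  else
    match st with
    | (blocks, fi, some p) =>
      if PySem.Str.startswith line "(" then
        pvFresh (blocks ++ [["text", p, ""]]) fi line
      else
        (blocks ++ [["text", p, line]], fi, none)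
    | (blocks, fi, none) => pvFresh blocks fi line

def parse_culture_content_alt (content_txt : String) : List (List String) × Option String :=
  match ((PySem.Str.split? content_txt "\n").getD []).foldl pvStepB ([], none, none) with
  | (blocks, fi, some p) => (blocks ++ [["text", p, ""]], fi)
  | (blocks, fi, none) => (blocks, fi)

-- ===== PRECONDITION & SPEC =====
def Spec_parse_culture_content (content_txt : String) (out : List (List String) × Option String) : Prop := out = parse_culture_content_alt content_txt
instance (content_txt : String) (out : List (List String) × Option String) : Decidable (Spec_parse_culture_content content_txt out) := by unfold Spec_parse_culture_content; infer_instance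

-- ===== CLAIM (what is proved, stated in full; the proofs are below) =====
def Claim_equal_parse_culture_content : Prop := ∀ (content_txt : String), Dom_parse_culture_content content_txt → Spec_parse_culture_content content_txt (parse_culture_content content_txt)

-- ===== LEMMAS AND PROOFS =====

-- B's step on a stripped, non-empty line (the strip/skip prefix already resolved)
def pvStepC (st : List (List String) × Option String × Option String) (line : String) :
    List (List String) × Option String × Option String :=
  match st with
  | (blocks, fi, some p) =>
    if PySem.Str.startswith line "(" then
      pvFresh (blocks ++ [["text", p, ""]]) fi line
    else
      (blocks ++ [["text", p, line]], fi, none)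
  | (blocks, fi, none) => pvFresh blocks fi line

def pvFinish (st : List (List String) × Option String × Option String) :
    List (List String) × Option String :=
  match st with
  | (blocks, fi, some p) => (blocks ++ [["text", p, ""]], fi)
  | (blocks, fi, none) => (blocks, fi)

theorem pvStepB_eq (st : List (List String) × Option String × Option String) (raw : String) :
    pvStepB st raw = if PySem.Str.strip raw = "" then st else pvStepC st (PySem.Str.strip raw) := by
  obtain ⟨blocks, fi, pending⟩ := st
  by_cases h : PySem.Str.strip raw = "" <;> cases pending <;> simp [pvStepB, pvStepC, h]

theorem foldB_eq_foldC (raws : List String)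
    (st : List (List String) × Option String × Option String) :
    raws.foldl pvStepB st
      = ((raws.map PySem.Str.strip).filter (fun l => !(l = ""))).foldl pvStepC st := by
  induction raws generalizing st with
  | nil => rfl
  | cons raw rest ih =>
    simp only [List.foldl, List.map, List.filter, pvStepB_eq]
    by_cases h : PySem.Str.strip raw = "" <;> simp [h, ih]

theorem loopA_eq_foldC_n : ∀ (n : Nat) (lines : List String), lines.length ≤ n →
    ∀ (blocks : List (List String)) (fi : Option String),
    pvLoopA lines blocks fi = pvFinish (lines.foldl pvStepC (blocks, fi, none)) := by
  intro n
  induction n with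
  | zero =>
    intro lines hlen blocks fi
    have : lines = [] := List.eq_nil_of_length_eq_zero (Nat.le_zero.mp hlen)
    subst this; rfl
  | succ n ih =>
    intro lines hlen blocks fi
    match lines with
    | [] => rfl
    | [l] =>
      simp only [pvLoopA, List.foldl, pvStepC, pvFresh, pvFinish]
      by_cases himg : (PySem.Str.startswith l "(" && PySem.Str.endswith l ")") = true
      · rw [if_pos himg, if_pos himg]
      · rw [if_neg himg, if_neg himg]
    | l :: r :: rest =>
      have hr : (r :: rest).length ≤ n := by simp at hlen ⊢; omega
      have hrest : rest.length ≤ n := by simp at hlen ⊢; omega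
      by_cases himg : (PySem.Str.startswith l "(" && PySem.Str.endswith l ")") = true
      · have h0 : pvStepC (blocks, fi, none) l
            = (blocks ++ [["img", PySem.Str.strip (PySem.Str.slice l (some 1) (some (-1)))]],
               (if fi.getD "" = "" then some (PySem.Str.strip (PySem.Str.slice l (some 1) (some (-1)))) else fi),
               none) := by
          simp only [pvStepC, pvFresh]; rw [if_pos himg]
        simp only [pvLoopA, List.foldl, h0]
        rw [if_pos himg]
        exact ih (r :: rest) hr _ _
      · have h1 : pvStepC (blocks, fi, none) l = (blocks, fi, some l) := by
          simp only [pvStepC, pvFresh]; rw [if_neg himg]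
        by_cases hpar : PySem.Str.startswith r "(" = true
        · have h2 : pvStepC (blocks, fi, some l) r
              = pvFresh (blocks ++ [["text", l, ""]]) fi r := by
            simp only [pvStepC]; rw [if_pos hpar]
          simp only [pvLoopA, List.foldl, h1, h2]
          rw [if_neg himg, if_pos hpar]
          exact ih (r :: rest) hr _ _
        · have h2 : pvStepC (blocks, fi, some l) r
              = (blocks ++ [["text", l, r]], fi, none) := by
            simp only [pvStepC]; rw [if_neg hpar]
          simp only [pvLoopA, List.foldl, h1, h2]
          rw [if_neg himg, if_neg hpar]
          exact ih rest hrest _ _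

-- ===== VERDICT (by name: the statement is the Claim_ definition above) =====
theorem parse_culture_content_spec : Claim_equal_parse_culture_content := by
  intro content_txt _
  unfold Spec_parse_culture_content parse_culture_content parse_culture_content_alt
  rw [foldB_eq_foldC]
  rw [loopA_eq_foldC_n (((((PySem.Str.split? content_txt "\n").getD []).map PySem.Str.strip).filter (fun l => !(l = ""))).length) _ (Nat.le_refl _)]
  rfl
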